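-- pv_equiv track=rewrite | github.com/aeabijl/advent-of-code-2023 | day6/script2.py | first_best_score_left
-- ===== SOURCE A (Python) =====
-- def is_record(hold, time, distance):
--     return hold * (time - hold) > distance
--
-- def first_best_score_left(time, distance):
--     low, high = 0, time
--     while low < high:
--         middle_button_hold = low + (high - low >> 1)
--         if is_record(middle_button_hold, time, distance):
--             high = middle_button_hold
--         else:
--             low = middle_button_hold + 1
--     return low
-- ===== SOURCE B (Python) =====
-- # Closed-form replacement for the binary search: solve hold*(time-hold) > distance
-- # algebraically via an integer square root (Newton's method), O(1) arithmetic steps.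
--
-- def _isqrt(n):
--     # floor square root of n >= 0, Newton's iteration
--     if n <= 1:
--         return n
--     guess = n // 2
--     while True:
--         nxt = (guess + n // guess) // 2
--         if nxt < guess:
--             guess = nxt
--         else:
--             return guess
--
-- def first_best_score_left(time, distance):
--     if time < 0:
--         return 0
--     disc = time * time - 4 * distance
--     if disc <= 0:
--         return time  # no hold beats the record
--     s = _isqrt(disc - 1)
--     # hold beats the record  iff  (2*hold - time)^2 < disc  iff  hmin <= hold <= hmax
--     hmin = (time - s + 1) // 2
--     hmax = (time + s) // 2
--     if hmin > hmax:
--         return time  # no integer hold beats the record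
--     return max(hmin, 0)
-- ===== Notes on version B (the rewrite author's own statement) =====
-- stated objective: alternative
-- what changed: Replaces the binary search over hold times with a closed-form solution of the quadratic hold*(time-hold) > distance: an integer square root (Newton's iteration) gives the record interval [hmin, hmax] exactly, and the answer is max(hmin, 0), with the same no-record defaults (time for time >= 0, 0 for negative time).
import Mathlib
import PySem

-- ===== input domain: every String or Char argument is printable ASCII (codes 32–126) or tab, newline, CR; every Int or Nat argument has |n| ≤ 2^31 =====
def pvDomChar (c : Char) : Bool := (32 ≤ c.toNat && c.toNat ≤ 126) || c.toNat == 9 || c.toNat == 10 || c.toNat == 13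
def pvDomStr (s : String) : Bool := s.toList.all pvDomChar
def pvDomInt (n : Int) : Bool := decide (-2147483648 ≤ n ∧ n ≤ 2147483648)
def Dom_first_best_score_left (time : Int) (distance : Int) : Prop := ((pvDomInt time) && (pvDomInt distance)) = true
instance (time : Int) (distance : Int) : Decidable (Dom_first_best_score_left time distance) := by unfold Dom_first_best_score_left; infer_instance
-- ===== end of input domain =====

-- B replaces A's binary search by a closed form: it solves hold*(time-hold) > distance
-- with an integer square root (Newton's iteration), O(1) arithmetic steps vs O(log time).

-- ===== PORT A =====
def is_record (hold : Int) (time : Int) (distance : Int) : Bool :=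
  decide (hold * (time - hold) > distance)

-- A's while-loop as recursion on (low, high); 'high - low >> 1' is Python's
-- arithmetic right shift = floor division by 2, exact via PySem.Int.floordiv.
def firstBestLoop (time : Int) (distance : Int) (low : Int) (high : Int) : Int :=
  if _h : low < high then
    let middle_button_hold := low + PySem.Int.floordiv (high - low) 2
    if is_record middle_button_hold time distance then
      firstBestLoop time distance low middle_button_hold
    else
      firstBestLoop time distance (middle_button_hold + 1) high
  else low
termination_by (high - low).toNat
decreasing_by
  · rw [PySem.Int.floordiv_eq_ediv_of_pos (show (0:Int) < 2 by omega)]; omega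
  · rw [PySem.Int.floordiv_eq_ediv_of_pos (show (0:Int) < 2 by omega)]; omega

def first_best_score_left (time : Int) (distance : Int) : Int :=
  firstBestLoop time distance 0 time

-- ===== PORT B =====
-- Source B's _isqrt Newton loop, on Nat (it is only called on a nonnegative value)
def isqrtIter (n : Nat) (guess : Nat) : Nat :=
  let nxt := (guess + n / guess) / 2
  if _h : nxt < guess then isqrtIter n nxt else guess
termination_by guess

def isqrtB (n : Nat) : Nat :=
  if n ≤ 1 then n else isqrtIter n (n / 2)

def first_best_score_left_alt (time : Int) (distance : Int) : Int :=
  if time < 0 then 0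
  else
    let disc := time * time - 4 * distance
    if disc ≤ 0 then time  -- no hold beats the record
    else
      -- disc - 1 ≥ 0 here, so the .toNat round-trip is exact
      let s : Int := ((isqrtB (disc - 1).toNat : Nat) : Int)
      let hmin := PySem.Int.floordiv (time - s + 1) 2
      let hmax := PySem.Int.floordiv (time + s) 2
      if hmin > hmax then time  -- no integer hold beats the record
      else max hmin 0

-- ===== PRECONDITION & SPEC =====
def Spec_first_best_score_left (time : Int) (distance : Int) (out : Int) : Prop := out = first_best_score_left_alt time distance
instance (time : Int) (distance : Int) (out : Int) : Decidable (Spec_first_best_score_left time distance out) := by unfold Spec_first_best_score_left; infer_instance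

-- ===== CLAIM (what is proved, stated in full; the proofs are below) =====
def Claim_equal_first_best_score_left : Prop := ∀ (time : Int) (distance : Int), Dom_first_best_score_left time distance → Spec_first_best_score_left time distance (first_best_score_left time distance)

-- ===== LEMMAS AND PROOFS =====

-- my isqrtIter is core's Nat.sqrt.iter
theorem isqrtIter_eq (n g : Nat) : isqrtIter n g = Nat.sqrt.iter n g := by
  induction g using Nat.strong_induction_on with
  | _ g ih =>
    unfold isqrtIter Nat.sqrt.iter
    dsimp only
    split_ifs with h
    · exact ih _ h
    · rfl

theorem isqrtB_sq_le (n : Nat) : isqrtB n * isqrtB n ≤ n := by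
  unfold isqrtB
  split_ifs with h
  · interval_cases n <;> decide
  · rw [isqrtIter_eq]; exact Nat.sqrt.iter_sq_le n (n / 2)

theorem lt_isqrtB_succ (n : Nat) : n < (isqrtB n + 1) * (isqrtB n + 1) := by
  unfold isqrtB
  split_ifs with h
  · nlinarith
  · rw [isqrtIter_eq]
    apply Nat.sqrt.lt_iter_succ_sq
    have h2 := Nat.div_add_mod n 2
    nlinarith [Nat.mod_lt n (show 0 < 2 by omega)]

-- characterization of the record predicate as a square bound
theorem record_iff_sq (t d h : Int) :
    is_record h t d = true ↔ (2*h - t) * (2*h - t) < t * t - 4 * d := by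
  simp only [is_record, decide_eq_true_eq]
  constructor <;> intro h1 <;> nlinarith

-- A's loop when nothing is a record: low climbs to high
theorem loop_none (t d : Int) (hnone : ∀ h : Int, ¬ is_record h t d = true) :
    ∀ low high : Int, low ≤ high → firstBestLoop t d low high = high := by
  intro low high hle
  rw [firstBestLoop]
  split_ifs with h1
  · have hdp := PySem.Int.floordiv_eq_ediv_of_pos (a := high - low) (show (0:Int) < 2 by omega)
    simp only [hnone _]
    exact loop_none t d hnone _ high (by omega)
  · omega
termination_by low high => (high - low).toNat
decreasing_by
  rw [PySem.Int.floordiv_eq_ediv_of_pos (show (0:Int) < 2 by omega)]; omega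

-- A's loop when the records are exactly the interval [hmin, hmax]:
-- it converges to max hmin 0, the first record in [0, t]
theorem loop_inv (t d hmin hmax : Int)
    (hp : ∀ h : Int, is_record h t d = true ↔ (hmin ≤ h ∧ h ≤ hmax))
    (hne : hmin ≤ hmax) (hsum : hmin + hmax = t) :
    ∀ low high : Int, 0 ≤ low → low ≤ max hmin 0 → max hmin 0 ≤ high → high ≤ t →
    (is_record high t d = true ∨ (low = 0 ∧ high = t)) →
    firstBestLoop t d low high = max hmin 0 := by
  intro low high h0 h1 h2 h3 hdisj
  rw [firstBestLoop]
  split_ifs with hlt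
  · have hdp := PySem.Int.floordiv_eq_ediv_of_pos (a := high - low) (show (0:Int) < 2 by omega)
    set mid := low + PySem.Int.floordiv (high - low) 2 with hmid
    by_cases hr : is_record mid t d = true
    · rw [if_pos hr]
      have hb := (hp mid).mp hr
      exact loop_inv t d hmin hmax hp hne hsum low mid h0 h1 (by omega) (by omega)
        (Or.inl hr)
    · rw [if_neg hr]
      rcases hdisj with hH | ⟨hl0, hht⟩
      · have hhb := (hp high).mp hH
        have hnb : ¬ (hmin ≤ mid ∧ mid ≤ hmax) := fun hc => hr ((hp mid).mpr hc)
        have hmlt : mid < hmin := by omega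
        exact loop_inv t d hmin hmax hp hne hsum (mid + 1) high (by omega) (by omega)
          h2 h3 (Or.inl hH)
      · -- low = 0, high = t: mid is the peak ⌊t/2⌋, which is a record — contradiction
        exact absurd ((hp mid).mpr (by omega)) hr
  · omega
termination_by low high => (high - low).toNat
decreasing_by
  · rw [PySem.Int.floordiv_eq_ediv_of_pos (show (0:Int) < 2 by omega)]; omega
  · rw [PySem.Int.floordiv_eq_ediv_of_pos (show (0:Int) < 2 by omega)]; omega

-- ===== VERDICT (by name: the statement is the Claim_ definition above) =====
theorem first_best_score_left_spec : Claim_equal_first_best_score_left := by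
  intro t d _dom
  unfold Spec_first_best_score_left first_best_score_left first_best_score_left_alt
  by_cases ht : t < 0
  · rw [if_pos ht, firstBestLoop]
    rw [dif_neg (by omega)]
  · rw [if_neg ht]
    dsimp only
    by_cases hdisc : t * t - 4 * d ≤ 0
    · rw [if_pos hdisc]
      apply loop_none t d ?_ 0 t (by omega)
      intro h hrec
      have := (record_iff_sq t d h).mp hrec
      nlinarith [mul_self_nonneg (2*h - t)]
    · rw [if_neg hdisc]
      set s : Int := ((isqrtB (t * t - 4 * d - 1).toNat : Nat) : Int) with hs
      have hs0 : 0 ≤ s := Int.natCast_nonneg _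
      have htn : ((t * t - 4 * d - 1).toNat : Int) = t * t - 4 * d - 1 :=
        Int.toNat_of_nonneg (by omega)
      have hb1 : s * s ≤ t * t - 4 * d - 1 := by
        have h1 := isqrtB_sq_le (t * t - 4 * d - 1).toNat
        rw [← htn, hs]; exact_mod_cast h1
      have hb2 : t * t - 4 * d - 1 < (s + 1) * (s + 1) := by
        have h1 := lt_isqrtB_succ (t * t - 4 * d - 1).toNat
        rw [← htn, hs]; exact_mod_cast h1
      have hd1 : PySem.Int.floordiv (t - s + 1) 2 = (t - s + 1) / 2 :=
        PySem.Int.floordiv_eq_ediv_of_pos (by omega)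
      have hd2 : PySem.Int.floordiv (t + s) 2 = (t + s) / 2 :=
        PySem.Int.floordiv_eq_ediv_of_pos (by omega)
      set hmin := PySem.Int.floordiv (t - s + 1) 2 with hmn
      set hmax := PySem.Int.floordiv (t + s) 2 with hmx
      have hchar : ∀ h : Int, is_record h t d = true ↔ (hmin ≤ h ∧ h ≤ hmax) := by
        intro h
        rw [record_iff_sq]
        constructor
        · intro hlt
          have hsle : (2*h - t) * (2*h - t) ≤ t * t - 4 * d - 1 := by omega
          have hub : 2*h - t ≤ s := by
            by_contra hc
            have hge : s + 1 ≤ 2*h - t := by omega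
            nlinarith
          have hlb : -s ≤ 2*h - t := by
            by_contra hc
            have hge : s + 1 ≤ -(2*h - t) := by omega
            nlinarith
          omega
        · intro ⟨ha, hb⟩
          have h1 : -s ≤ 2*h - t := by omega
          have h2 : 2*h - t ≤ s := by omega
          nlinarith [mul_nonneg (by omega : (0:Int) ≤ s - (2*h - t)) (by omega : (0:Int) ≤ s + (2*h - t))]
      have hsum : hmin + hmax = t := by omega
      by_cases hcmp : hmin > hmax
      · rw [if_pos hcmp]
        apply loop_none t d ?_ 0 t (by omega)
        intro h hrec
        have := (hchar h).mp hrec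
        omega
      · rw [if_neg hcmp]
        exact loop_inv t d hmin hmax hchar (by omega) hsum 0 t (by omega) (by omega)
          (by omega) (by omega) (Or.inr ⟨rfl, rfl⟩)
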